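-- pv_equiv track=rewrite | github.com/chiaratsig/4300-Flask-Template-JSON | backend/helpers/analysis.py | build_word_episode_distribution
-- ===== SOURCE A (Python) =====
-- from typing import List, Tuple, Dict
--
-- def build_word_episode_distribution(input_word_counts: Dict[str, str]) -> Dict[int, int]:
--     """Returns a dictionary that counts how many words appear in exactly a given number of episodes
--
--     Parameters
--     ----------
--     input_word_counts : Dict[str, str]
--         A dictionary of word mappeds to the number of episodes they appear in.
--
--     Returns
--     -------
--     Dict[int, int]
--         A dictionary that maps a number of episodes to the number of words that appear in that many episodes.
--     """
--     dist = dict()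
--     for key in input_word_counts.keys():
--       count = input_word_counts[key]
--       if count not in dist.keys():
--         dist[count] = 0
--       dist[count] += 1
--     return dist
-- ===== SOURCE B (Python) =====
-- def build_word_episode_distribution(input_word_counts):
--     """Partition recursion: repeatedly split the remaining values on the first
--     one, emit (value, size of its class), and recurse on the rest."""
--     def go(vals):
--         if not vals:
--             return []
--         v = vals[0]
--         same = [x for x in vals if x == v]
--         rest = [x for x in vals if x != v]
--         return [(v, len(same))] + go(rest)
--     return dict(go(list(input_word_counts.values())))
-- ===== Notes on version B (the rewrite author's own statement) =====
-- stated objective: alternative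
-- what changed: A builds the histogram with one incremental dict-counting pass (membership test, init to 0, increment); B uses no counting container: a partition recursion that repeatedly splits the remaining values on the first one, emits (value, class size) from the matching partition, and recurses on the non-matching rest.
import Mathlib
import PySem

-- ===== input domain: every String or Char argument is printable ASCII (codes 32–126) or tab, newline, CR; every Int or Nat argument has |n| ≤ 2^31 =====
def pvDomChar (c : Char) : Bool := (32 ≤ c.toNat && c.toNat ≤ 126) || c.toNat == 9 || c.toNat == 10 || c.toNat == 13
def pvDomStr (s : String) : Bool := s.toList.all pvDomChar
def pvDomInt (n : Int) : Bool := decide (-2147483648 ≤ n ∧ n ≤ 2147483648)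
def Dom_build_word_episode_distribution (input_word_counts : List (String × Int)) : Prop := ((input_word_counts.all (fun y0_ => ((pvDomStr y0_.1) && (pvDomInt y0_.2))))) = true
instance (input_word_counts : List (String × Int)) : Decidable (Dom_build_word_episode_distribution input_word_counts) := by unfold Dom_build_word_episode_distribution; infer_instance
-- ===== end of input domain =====

-- B replaces A's incremental dict-counting pass by a partition recursion with no counting
-- container: split the remaining values on the first one, emit (value, class size), recurse
-- on the rest (alternative decomposition, same result).

-- ===== PORT A =====
-- dist = {}; for key in d.keys(): count = d[key]; if count not in dist: dist[count] = 0; dist[count] += 1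
def build_word_episode_distribution (input_word_counts : List (String × Int)) : List (Int × Int) :=
  let d := PySem.Dict.ofList input_word_counts
  (d.keys.foldl (fun dist k =>
      let count := d.getD k 0   -- d[key]: key ∈ d.keys, so the Python lookup never raises
      let dist := if dist.contains count then dist else dist.insert count 0
      dist.modify count 0 (· + 1))
    PySem.Dict.empty).items

-- ===== PORT B =====
-- go(vals): if not vals: []; v = vals[0]; same/rest = partitions of vals on == v;
--           [(v, len(same))] + go(rest)
def pvGoB (vals : List Int) : List (Int × Int) :=
  match vals with
  | [] => []
  | v :: t =>
      let same := (v :: t).filter (fun x => x == v)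
      let rest := (v :: t).filter (fun x => x != v)
      (v, (same.length : Int)) :: pvGoB rest
termination_by vals.length
decreasing_by
  simp only [List.filter_cons]
  simp only [bne_self_eq_false, List.length_cons]
  exact Nat.lt_succ_of_le (List.length_filter_le _ t)

-- dict(go(list(d.values())))
def build_word_episode_distribution_alt (input_word_counts : List (String × Int)) : List (Int × Int) :=
  (PySem.Dict.ofList (pvGoB (PySem.Dict.ofList input_word_counts).values)).items

-- ===== PRECONDITION & SPEC =====
def Spec_build_word_episode_distribution (input_word_counts : List (String × Int)) (out : List (Int × Int)) : Prop := out = build_word_episode_distribution_alt input_word_counts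
instance (input_word_counts : List (String × Int)) (out : List (Int × Int)) : Decidable (Spec_build_word_episode_distribution input_word_counts out) := by unfold Spec_build_word_episode_distribution; infer_instance

-- ===== CLAIM (what is proved, stated in full; the proofs are below) =====
def Claim_equal_build_word_episode_distribution : Prop := ∀ (input_word_counts : List (String × Int)), Dom_build_word_episode_distribution input_word_counts → Spec_build_word_episode_distribution input_word_counts (build_word_episode_distribution input_word_counts)

-- ===== LEMMAS AND PROOFS =====

-- One step of A's loop is exactly a Counter step.
theorem step_eq_modify (dist : PySem.Dict Int Int) (c : Int) :
    (if dist.contains c then dist else dist.insert c 0).modify c 0 (· + 1)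
      = dist.modify c 0 (· + 1) := by
  by_cases h : dist.contains c = true
  · simp [h]
  · have hm : ∀ (e : PySem.Dict Int Int), e.modify c 0 (· + 1) = e.insert c (e.getD c 0 + 1) :=
      fun e => rfl
    have hf : dist.contains c = false := by simpa using h
    rw [if_neg h, hm, hm, PySem.Dict.getD_insert_self, PySem.Dict.insert_insert_self]
    simp [PySem.Dict.getD_of_not_contains, hf]

-- A's loop over ks is the Counter loop over the looked-up values.
theorem loop_eq_counter (d : PySem.Dict String Int) (ks : List String) (dist : PySem.Dict Int Int) :
    ks.foldl (fun dist k =>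
        (if dist.contains (d.getD k 0) then dist else dist.insert (d.getD k 0) 0).modify (d.getD k 0) 0 (· + 1)) dist
      = (ks.map (fun k => d.getD k 0)).foldl (fun d x => d.modify x 0 (· + 1)) dist := by
  induction ks generalizing dist with
  | nil => rfl
  | cons k t ih =>
    rw [List.foldl_cons, List.map_cons, List.foldl_cons, step_eq_modify]
    exact ih _

-- Looking the keys up in order yields exactly the values (keys are unique).
theorem map_getD_aux (l : List (String × Int)) (h : (l.map Prod.fst).Nodup) :
    (l.map Prod.fst).map (fun k => (PySem.Dict.mk l).getD k 0) = l.map Prod.snd := by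
  induction l with
  | nil => rfl
  | cons p rest ih =>
    obtain ⟨k0, v0⟩ := p
    simp only [List.map_cons, List.nodup_cons] at h ⊢
    refine List.cons_eq_cons.mpr ⟨?_, ?_⟩
    · simp [PySem.Dict.getD_eq_get?_getD, PySem.Dict.get?_mk_cons]
    · rw [← ih h.2]
      apply List.map_congr_left
      intro k hk
      have hne : k0 ≠ k := fun he => h.1 (he ▸ hk)
      simp [PySem.Dict.getD_eq_get?_getD, PySem.Dict.get?_mk_cons, hne]

theorem map_getD_keys (d : PySem.Dict String Int) (h : d.keys.Nodup) :
    d.keys.map (fun k => d.getD k 0) = d.values := by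
  rcases d with ⟨l⟩
  simp only [PySem.Dict.keys, PySem.Dict.values] at *
  exact map_getD_aux l h

-- filtering commutes with ordered dedup
theorem ofList_filter_comm (p : Int → Bool) (t : List Int) :
    PySem.Set.ofList (t.filter p) = (PySem.Set.ofList t).filter p := by
  induction t with
  | nil => rfl
  | cons x xs ih =>
    simp only [List.filter_cons]
    by_cases h : p x = true
    · rw [if_pos h]
      simp only [PySem.Set.ofList_cons, PySem.Set.discard, ih, List.filter_cons, h,
        if_true, List.filter_filter]
      refine List.cons_eq_cons.mpr ⟨rfl, ?_⟩
      apply List.filter_congr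
      intro a _
      exact Bool.and_comm _ _
    · have hx : p x = false := by simpa using h
      rw [if_neg h]
      simp only [PySem.Set.ofList_cons, PySem.Set.discard, ih, List.filter_cons, hx,
        Bool.false_eq_true, if_false, List.filter_filter]
      apply List.filter_congr
      intro a _
      by_cases ha : a = x
      · subst ha; simp [hx]
      · simp [ha]

-- B's partition recursion computes the (first occurrence, total count) list.
theorem pvGoB_eq (vals : List Int) :
    pvGoB vals = (PySem.Set.ofList vals).map (fun k => (k, (vals.count k : Int))) := by
  induction vals using pvGoB.induct with
  | case1 => rw [pvGoB]; rfl
  | case2 v t rest ih =>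
    rw [pvGoB]
    simp only [PySem.Set.ofList_cons, List.map_cons]
    refine List.cons_eq_cons.mpr ⟨?_, ?_⟩
    · congr 1
      congr 1
      simp [List.count_eq_length_filter]
    · have hset : PySem.Set.discard (PySem.Set.ofList t) v
          = PySem.Set.ofList ((v :: t).filter (fun x => x != v)) := by
        simp only [List.filter_cons, bne_self_eq_false, Bool.false_eq_true, if_false]
        rw [ofList_filter_comm]
        simp [PySem.Set.discard, bne]
      rw [hset, ih]
      apply List.map_congr_left
      intro k hk
      have hkne : k ≠ v := by
        have hk' : k ∈ PySem.Set.ofList ((v :: t).filter (fun x => x != v)) := hk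
        have := (PySem.Set.mem_ofList _ _).mp hk'
        have := List.of_mem_filter this
        simpa [bne] using this
      congr 1
      congr 1
      show List.count k (List.filter (fun x => x != v) (v :: t)) = List.count k (v :: t)
      simp only [List.filter_cons, bne_self_eq_false, Bool.false_eq_true, if_false]
      rw [List.count_filter (by simp [bne, hkne])]; simp [Ne.symm hkne]

-- dict(pairs) on distinct keys returns exactly those pairs.
theorem items_ofList_of_nodup (pairs : List (Int × Int)) (h : (pairs.map Prod.fst).Nodup) :
    (PySem.Dict.ofList pairs).items = pairs := by
  have := PySem.Dict.items_foldl_insert_fresh (l := pairs) (d := (PySem.Dict.empty : PySem.Dict Int Int))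
      (k := Prod.fst) (v := Prod.snd) (by intro a _; rfl) h
  simpa [PySem.Dict.ofList, PySem.Dict.items] using this

-- ===== VERDICT (by name: the statement is the Claim_ definition above) =====
theorem build_word_episode_distribution_spec : Claim_equal_build_word_episode_distribution := by
  intro xs _
  unfold Spec_build_word_episode_distribution build_word_episode_distribution build_word_episode_distribution_alt
  simp only []
  rw [loop_eq_counter, map_getD_keys _ (PySem.Dict.nodup_keys_ofList xs),
      ← PySem.Dict.counter_eq_foldl, PySem.Dict.items_counter, pvGoB_eq,
      items_ofList_of_nodup]
  simp only [List.map_map]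
  have hid : (Prod.fst ∘ fun k => (k, ((PySem.Dict.ofList xs).values.count k : Int)))
      = fun (k : Int) => k := rfl
  rw [hid]; simp only [List.map_id_fun']
  exact PySem.Set.nodup_ofList _
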